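-- pv_equiv track=rewrite | github.com/albertkx/CoNAL | ood_generation/generation_utils.py | is_not_noise
-- ===== SOURCE A (Python) =====
-- def is_not_noise(label):
--     disallowed_seqs = ["_", ".", "{", "}", "=", "[", "]", "(", ")", "$", "\\", "/", "<", ">", "|", "~", '"', "\t", "\n", "'", "-"]
--     for ds in disallowed_seqs:
--         if ds in label:
--             return False
--     for digit in range(10):
--         if str(digit) in label:
--             return False
--     return True
-- ===== SOURCE B (Python) =====
-- _FORBIDDEN = frozenset('_.{}=[]()$\\/<>|~"\t\n\'-0123456789')
--
-- def is_not_noise(label):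
--     return all(c not in _FORBIDDEN for c in label)
-- ===== Notes on version B (the rewrite author's own statement) =====
-- stated objective: alternative
-- what changed: B inverts the traversal: instead of scanning the whole label once for each of the 31 disallowed tokens, it makes a single pass over the label's characters testing each against one precomputed frozenset of forbidden characters; in CPython A's C-level substring scans are faster in practice, so no speed is claimed.
import Mathlib
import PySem

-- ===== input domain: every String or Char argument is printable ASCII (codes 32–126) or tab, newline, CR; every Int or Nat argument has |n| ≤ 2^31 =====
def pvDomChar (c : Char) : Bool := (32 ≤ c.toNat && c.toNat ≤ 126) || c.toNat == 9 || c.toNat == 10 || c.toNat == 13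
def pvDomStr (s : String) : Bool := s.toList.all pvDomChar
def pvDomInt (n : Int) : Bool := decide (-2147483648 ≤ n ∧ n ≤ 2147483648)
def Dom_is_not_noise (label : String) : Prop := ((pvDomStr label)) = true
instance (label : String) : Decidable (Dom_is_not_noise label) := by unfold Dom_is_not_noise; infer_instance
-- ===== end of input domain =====

-- B scans the label once against one precomputed set of forbidden characters instead of
-- scanning the label once per forbidden token.

-- ===== PORT A =====
-- first loop of A: for ds in disallowed_seqs: if ds in label: return False
def checkSeqs (label : String) : List String → Bool
  | [] => true
  | ds :: rest => if PySem.Str.isIn ds label then false else checkSeqs label rest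

-- second loop of A: for digit in range(10): if str(digit) in label: return False
def checkDigits (label : String) : List Int → Bool
  | [] => true
  | d :: rest => if PySem.Str.isIn (PySem.Int.toStr d) label then false else checkDigits label rest

def is_not_noise (label : String) : Bool :=
  let disallowed_seqs : List String :=
    ["_", ".", "{", "}", "=", "[", "]", "(", ")", "$", "\\", "/", "<", ">", "|", "~", "\"", "\t", "\n", "'", "-"]
  if checkSeqs label disallowed_seqs then checkDigits label (PySem.List.pyRange 0 10 1) else false

-- ===== PORT B =====
def forbiddenChars : PySem.Set Char :=
  PySem.Set.ofList ['_', '.', '{', '}', '=', '[', ']', '(', ')', '$', '\\', '/', '<', '>',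
                    '|', '~', '"', '\t', '\n', '\'', '-', '0', '1', '2', '3', '4', '5', '6', '7', '8', '9']

def is_not_noise_alt (label : String) : Bool :=
  label.toList.all (fun c => !(PySem.Set.contains forbiddenChars c))

-- ===== PRECONDITION & SPEC =====
def Spec_is_not_noise (label : String) (out : Bool) : Prop := out = is_not_noise_alt label
instance (label : String) (out : Bool) : Decidable (Spec_is_not_noise label out) := by unfold Spec_is_not_noise; infer_instance

-- ===== CLAIM (what is proved, stated in full; the proofs are below) =====
def Claim_equal_is_not_noise : Prop := ∀ (label : String), Dom_is_not_noise label → Spec_is_not_noise label (is_not_noise label)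

-- ===== LEMMAS AND PROOFS =====

-- swapping the two nested membership scans: all-of-no-hits is symmetric in the two lists
theorem swap_all (l m : List Char) : l.all (fun c => !(m.contains c)) = m.all (fun c => !(l.contains c)) := by
  rw [Bool.eq_iff_iff]; simp; tauto

-- a single-character substring test is character membership
theorem isIn_single (c : Char) (s : List Char) : PySem.Chars.isIn [c] s = s.contains c := by
  rw [Bool.eq_iff_iff, PySem.Chars.isIn_iff_infix, List.contains_iff_mem]
  constructor
  · intro h; exact h.subset (by simp)
  · intro h; obtain ⟨a, b, rfl⟩ := List.append_of_mem h; exact ⟨a, b, by simp⟩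

theorem checkSeqs_all (label : String) (ds : List String) :
    checkSeqs label ds = ds.all (fun d => !(PySem.Str.isIn d label)) := by
  induction ds with
  | nil => rfl
  | cons d rest ih => by_cases h : PySem.Str.isIn d label <;> simp [checkSeqs, ih]

theorem checkDigits_all (label : String) (ls : List Int) :
    checkDigits label ls = ls.all (fun d => !(PySem.Str.isIn (PySem.Int.toStr d) label)) := by
  induction ls with
  | nil => rfl
  | cons d rest ih => by_cases h : PySem.Str.isIn (PySem.Int.toStr d) label <;> simp [checkDigits, ih]

-- A's result, re-expressed as "no forbidden character occurs in the label"
theorem A_char (label : String) : is_not_noise label =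
    (['_', '.', '{', '}', '=', '[', ']', '(', ')', '$', '\\', '/', '<', '>',
      '|', '~', '"', '\t', '\n', '\'', '-', '0', '1', '2', '3', '4', '5', '6', '7', '8', '9'] : List Char).all
      (fun c => !(label.toList.contains c)) := by
  have hr : PySem.List.pyRange 0 10 1 = [0, 1, 2, 3, 4, 5, 6, 7, 8, 9] := by decide
  have ht : (PySem.Int.toChars 0 = ['0']) ∧ (PySem.Int.toChars 1 = ['1']) ∧ (PySem.Int.toChars 2 = ['2']) ∧
      (PySem.Int.toChars 3 = ['3']) ∧ (PySem.Int.toChars 4 = ['4']) ∧ (PySem.Int.toChars 5 = ['5']) ∧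
      (PySem.Int.toChars 6 = ['6']) ∧ (PySem.Int.toChars 7 = ['7']) ∧ (PySem.Int.toChars 8 = ['8']) ∧
      (PySem.Int.toChars 9 = ['9']) := by decide
  obtain ⟨t0, t1, t2, t3, t4, t5, t6, t7, t8, t9⟩ := ht
  simp only [is_not_noise, checkSeqs_all, checkDigits_all, hr]
  rw [show ∀ a b : Bool, (if a then b else false) = (a && b) from by decide]
  simp [isIn_single, t0, t1, t2, t3, t4, t5, t6, t7, t8, t9, Bool.and_assoc]

-- B's result, with the set spelled out as its element list
theorem B_char (label : String) : is_not_noise_alt label =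
    label.toList.all (fun c =>
      !((['_', '.', '{', '}', '=', '[', ']', '(', ')', '$', '\\', '/', '<', '>',
          '|', '~', '"', '\t', '\n', '\'', '-', '0', '1', '2', '3', '4', '5', '6', '7', '8', '9'] : List Char).contains c)) := by
  have hf : forbiddenChars =
      ['_', '.', '{', '}', '=', '[', ']', '(', ')', '$', '\\', '/', '<', '>',
       '|', '~', '"', '\t', '\n', '\'', '-', '0', '1', '2', '3', '4', '5', '6', '7', '8', '9'] := by decide
  simp [is_not_noise_alt, hf, PySem.Set.contains]

-- ===== VERDICT (by name: the statement is the Claim_ definition above) =====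
theorem is_not_noise_spec : Claim_equal_is_not_noise := by
  intro label _
  unfold Spec_is_not_noise
  rw [A_char, B_char, swap_all]
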